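-- pv_equiv track=rewrite | github.com/Jibaru/advent-of-code-2023 | day-13/day-13.py | find_reflection_index
-- ===== SOURCE A (Python) =====
-- def are_equals(matrix, j, k):
--     a = tuple(matrix[j])
--     b = tuple(matrix[k])
--
--     return a == b
--
-- def find_reflection_index(matrix: list[list[str]]) -> int:
--     nrows = len(matrix)
--
--     for i in range(nrows - 1):
--         j = i
--         k = i + 1
--         found = True
--         while j >= 0 and k < nrows:
--             if not are_equals(matrix, j, k):
--                 found = False
--                 break
--
--             j = j - 1
--             k = k + 1
--         if found:
--             return i
--     return -1
-- ===== SOURCE B (Python) =====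
-- def find_reflection_index(matrix: list[list[str]]) -> int:
--     # Intern each row once (hash-consing): equal rows share one integer id,
--     # so mirror checks compare ints instead of re-comparing rows element-wise.
--     ids = {}
--     keys = []
--     for row in matrix:
--         t = tuple(row)
--         if t not in ids:
--             ids[t] = len(ids)
--         keys.append(ids[t])
--     n = len(keys)
--     for i in range(n - 1):
--         top = keys[:i + 1][::-1]
--         if all(a == b for a, b in zip(top, keys[i + 1:])):
--             return i
--     return -1
-- ===== Notes on version B (the rewrite author's own statement) =====
-- stated objective: alternative
-- what changed: B interns each row once into a dict of integer ids and then tests each mirror position by comparing the reversed prefix of the id list against the suffix (slice/zip), instead of A's nested two-pointer while loop that re-compares whole rows element-wise at every candidate.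
import Mathlib
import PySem

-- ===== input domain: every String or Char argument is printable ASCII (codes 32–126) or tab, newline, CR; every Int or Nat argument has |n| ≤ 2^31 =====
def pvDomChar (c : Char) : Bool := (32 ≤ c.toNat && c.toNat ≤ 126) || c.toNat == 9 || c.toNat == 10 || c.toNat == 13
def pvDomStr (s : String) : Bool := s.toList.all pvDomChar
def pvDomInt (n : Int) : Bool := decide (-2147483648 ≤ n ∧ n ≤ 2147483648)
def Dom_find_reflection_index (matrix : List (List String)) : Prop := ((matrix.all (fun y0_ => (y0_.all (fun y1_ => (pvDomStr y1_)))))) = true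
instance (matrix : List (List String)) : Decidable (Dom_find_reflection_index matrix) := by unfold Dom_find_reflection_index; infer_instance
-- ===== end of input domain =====

-- B interns each row once in a dict (equal rows share one integer id) and then checks each
-- mirror position by comparing the reversed prefix of the id list with its suffix — a
-- different data structure and traversal than A's nested two-pointer row-comparison loop.

-- ===== PORT A =====
def are_equals (matrix : List (List String)) (j k : Int) : Bool :=
  let a := PySem.List.pyGet? matrix j
  let b := PySem.List.pyGet? matrix k
  a == b

-- fuel is only a structural totality device: it is always called with enough fuel
def aWhile (matrix : List (List String)) (nrows j k : Int) : Nat → Bool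
  | 0 => true
  | fuel + 1 =>
    if 0 ≤ j ∧ k < nrows then
      if !(are_equals matrix j k) then false
      else aWhile matrix nrows (j - 1) (k + 1) fuel
    else true

def aOuter (matrix : List (List String)) (nrows i : Int) : Nat → Int
  | 0 => -1
  | fuel + 1 =>
    if i < nrows - 1 then
      if aWhile matrix nrows i (i + 1) matrix.length then i
      else aOuter matrix nrows (i + 1) fuel
    else -1

def find_reflection_index (matrix : List (List String)) : Int :=
  aOuter matrix matrix.length 0 matrix.length

-- ===== PORT B =====
def internStep (st : PySem.Dict (List String) Int × List Int) (row : List String) :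
    PySem.Dict (List String) Int × List Int :=
  let ids := if st.1.contains row then st.1 else st.1.insert row (st.1.size : Int)
  (ids, st.2 ++ [ids.getD row 0])

def bSearch (keys : List Int) (n i : Nat) : Nat → Int
  | 0 => -1
  | fuel + 1 =>
    if i < n - 1 then
      if (((keys.take (i + 1)).reverse).zip (keys.drop (i + 1))).all (fun p => p.1 == p.2)
      then (i : Int)
      else bSearch keys n (i + 1) fuel
    else -1

def find_reflection_index_alt (matrix : List (List String)) : Int :=
  let st := matrix.foldl internStep (PySem.Dict.empty, [])
  let keys := st.2
  bSearch keys keys.length 0 keys.length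

-- ===== PRECONDITION & SPEC =====
def Spec_find_reflection_index (matrix : List (List String)) (out : Int) : Prop := out = find_reflection_index_alt matrix
instance (matrix : List (List String)) (out : Int) : Decidable (Spec_find_reflection_index matrix out) := by unfold Spec_find_reflection_index; infer_instance

-- ===== CLAIM (what is proved, stated in full; the proofs are below) =====
def Claim_equal_find_reflection_index : Prop := ∀ (matrix : List (List String)), Dom_find_reflection_index matrix → Spec_find_reflection_index matrix (find_reflection_index matrix)

-- ===== LEMMAS AND PROOFS =====

-- canonical id of a row: its position among the first occurrences of the rows of m
def cId (m : List (List String)) (r : List String) : Int :=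
  (((PySem.List.index? (PySem.List.dedup m) r).getD 0 : Nat) : Int)

theorem dedup_append_singleton (p : List (List String)) (x : List String) :
    PySem.List.dedup (p ++ [x]) =
      if x ∈ PySem.List.dedup p then PySem.List.dedup p else PySem.List.dedup p ++ [x] := by
  simp only [PySem.List.dedup_eq_ofList, PySem.Set.ofList_eq_foldl, List.foldl_append,
    List.foldl_cons, List.foldl_nil]
  simp [PySem.Set.add, PySem.Set.contains]

-- the interning loop: the dict's keys are the distinct rows in first-occurrence order,
-- each mapped to its position there, and the id list is the row list under that map
theorem intern_inv (m : List (List String)) :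
    (m.foldl internStep (PySem.Dict.empty, [])).1.keys = PySem.List.dedup m ∧
    (∀ t, (m.foldl internStep (PySem.Dict.empty, [])).1.get? t =
      (PySem.List.index? (PySem.List.dedup m) t).map (fun n => (n : Int))) ∧
    (m.foldl internStep (PySem.Dict.empty, [])).2 = m.map (cId m) := by
  induction m using List.reverseRecOn with
  | nil =>
      refine ⟨?_, ?_, rfl⟩
      · simp [PySem.Dict.keys_empty, PySem.List.dedup]
      · intro t
        simp [PySem.Dict.get?_empty, PySem.List.dedup, PySem.List.index?]
  | append_singleton p x ih =>
      obtain ⟨hk, hg, hv⟩ := ih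
      rw [List.foldl_append, List.foldl_cons, List.foldl_nil]
      have hsz : ((p.foldl internStep (PySem.Dict.empty, [])).1.size : Int)
          = ((PySem.List.dedup p).length : Int) := by
        have h1 : (p.foldl internStep (PySem.Dict.empty, [])).1.keys.length
            = (PySem.List.dedup p).length := by rw [hk]
        simp only [PySem.Dict.keys, List.length_map] at h1
        simp [PySem.Dict.size, h1]
      by_cases hx : x ∈ p
      · -- row already interned
        have hmem : x ∈ PySem.List.dedup p := (PySem.List.mem_dedup p x).mpr hx
        have hded : PySem.List.dedup (p ++ [x]) = PySem.List.dedup p := by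
          rw [dedup_append_singleton, if_pos hmem]
        obtain ⟨k, hk2⟩ : ∃ k, PySem.List.index? (PySem.List.dedup p) x = some k :=
          Option.isSome_iff_exists.mp ((PySem.List.index?_isSome_iff _ _).mpr hmem)
        have hc : (p.foldl internStep (PySem.Dict.empty, [])).1.contains x = true := by
          rw [PySem.Dict.contains_eq_isSome_get?, hg x, hk2]; rfl
        have hgd : (p.foldl internStep (PySem.Dict.empty, [])).1.getD x 0 = (k : Int) := by
          rw [PySem.Dict.getD_eq_get?_getD, hg x, hk2]; rfl
        refine ⟨?_, ?_, ?_⟩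
        · simp only [internStep, hc, if_true, hded, hk]
        · intro t
          simp only [internStep, hc, if_true, hded, hg t]
        · simp only [internStep, hc, if_true, hv, hgd, List.map_append, List.map_cons,
            List.map_nil]
          congr 1
          · apply List.map_congr_left
            intro r hr
            simp only [cId, hded]
          · simp only [cId, hded, hk2, Option.getD_some]
      · -- fresh row
        have hmem : x ∉ PySem.List.dedup p := fun h => hx ((PySem.List.mem_dedup p x).mp h)
        have hded : PySem.List.dedup (p ++ [x]) = PySem.List.dedup p ++ [x] := by
          rw [dedup_append_singleton, if_neg hmem]
        have hnone : PySem.List.index? (PySem.List.dedup p) x = none :=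
          (PySem.List.index?_eq_none_iff _ _).mpr hmem
        have hc : (p.foldl internStep (PySem.Dict.empty, [])).1.contains x = false := by
          rw [PySem.Dict.contains_eq_isSome_get?, hg x, hnone]; rfl
        refine ⟨?_, ?_, ?_⟩
        · simp only [internStep, hc, Bool.false_eq_true, if_false, hded]
          rw [PySem.Dict.keys_insert_of_not_contains _ _ hc, hk]
        · intro t
          simp only [internStep, hc, Bool.false_eq_true, if_false, hded]
          rw [PySem.Dict.get?_insert]
          by_cases htx : t = x
          · subst htx
            rw [if_pos rfl, PySem.List.index?_append_singleton_self _ _ hmem, hsz]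
            simp
          · rw [if_neg htx, hg t]
            by_cases htp : t ∈ PySem.List.dedup p
            · rw [PySem.List.index?_append_of_mem _ htp]
            · have : PySem.List.index? (PySem.List.dedup p ++ [x]) t = none := by
                apply (PySem.List.index?_eq_none_iff _ _).mpr
                have htp' : t ∉ p := fun h => htp ((PySem.List.mem_dedup p t).mpr h)
                simp [htp', htx]
              rw [this, (PySem.List.index?_eq_none_iff _ _).mpr htp]
        · simp only [internStep, hc, Bool.false_eq_true, if_false, hv,
            List.map_append, List.map_cons, List.map_nil]
          congr 1
          · apply List.map_congr_left
            intro r hr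
            have hrd : r ∈ PySem.List.dedup p := (PySem.List.mem_dedup p r).mpr hr
            simp only [cId, hded, PySem.List.index?_append_of_mem _ hrd]
          · rw [PySem.Dict.getD_insert_self]
            simp only [cId, hded, PySem.List.index?_append_singleton_self _ _ hmem, hsz,
              Option.getD_some]

-- two rows of m share an id exactly when they are equal
theorem cId_inj (m : List (List String)) {r s : List String}
    (hr : r ∈ m) (hs : s ∈ m) : cId m r = cId m s ↔ r = s := by
  constructor
  · intro h
    obtain ⟨kr, hkr⟩ := Option.isSome_iff_exists.mp
      ((PySem.List.index?_isSome_iff _ _).mpr ((PySem.List.mem_dedup m r).mpr hr))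
    obtain ⟨ks, hks⟩ := Option.isSome_iff_exists.mp
      ((PySem.List.index?_isSome_iff _ _).mpr ((PySem.List.mem_dedup m s).mpr hs))
    simp only [cId, hkr, hks, Option.getD_some] at h
    have hkk : kr = ks := by exact_mod_cast h
    obtain ⟨hlr, her, -⟩ := PySem.List.getElem_of_index?_eq_some hkr
    obtain ⟨hls, hes, -⟩ := PySem.List.getElem_of_index?_eq_some hks
    subst hkk
    rw [← her, ← hes]
  · rintro rfl; rfl

theorem all_congr_mem' {α : Type} (l : List α) (f g : α → Bool)
    (h : ∀ x ∈ l, f x = g x) : l.all f = l.all g := by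
  induction l with
  | nil => rfl
  | cons a t ih =>
    simp only [List.all_cons, h a (by simp), ih (fun x hx => h x (by simp [hx]))]

-- the id-level mirror test equals the row-level mirror test
theorem cond_eq (m : List (List String)) (i : Nat) :
    ((((m.map (cId m)).take (i + 1)).reverse).zip ((m.map (cId m)).drop (i + 1))).all
        (fun p => p.1 == p.2) =
      (((m.take (i + 1)).reverse).zip (m.drop (i + 1))).all (fun p => p.1 == p.2) := by
  rw [← List.map_take, ← List.map_reverse, ← List.map_drop, List.zip_map, List.all_map]
  apply all_congr_mem'
  intro x hx
  obtain ⟨h1, h2⟩ := List.of_mem_zip hx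
  have hm1 : x.1 ∈ m := List.mem_of_mem_take (List.mem_reverse.mp h1)
  have hm2 : x.2 ∈ m := List.mem_of_mem_drop h2
  simp only [Function.comp, Prod.map_fst, Prod.map_snd]
  apply Bool.eq_iff_iff.mpr
  simp [beq_iff_eq, cId_inj m hm1 hm2]

theorem aWhile_succ (m : List (List String)) (n j k : Int) (f : Nat) :
    aWhile m n j k (f + 1) =
      if 0 ≤ j ∧ k < n then
        if !(are_equals m j k) then false else aWhile m n (j - 1) (k + 1) f
      else true := rfl

theorem aOuter_succ (m : List (List String)) (n i : Int) (f : Nat) :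
    aOuter m n i (f + 1) =
      if i < n - 1 then
        if aWhile m n i (i + 1) m.length then i else aOuter m n (i + 1) f
      else -1 := rfl

theorem bSearch_succ (keys : List Int) (n i f : Nat) :
    bSearch keys n i (f + 1) =
      if i < n - 1 then
        if (((keys.take (i + 1)).reverse).zip (keys.drop (i + 1))).all (fun p => p.1 == p.2)
        then (i : Int)
        else bSearch keys n (i + 1) f
      else -1 := rfl

-- A's inner while loop walks exactly the zipped reversed-prefix/suffix pairs
theorem while_eq (m : List (List String)) (i : Nat) :
    ∀ (fuel t : Nat), i + 1 ≤ m.length → t ≤ i + 1 → i + 1 - t ≤ fuel →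
      aWhile m m.length ((i : Int) - t) ((i : Int) + 1 + t) fuel =
        ((((m.take (i + 1)).reverse).drop t).zip ((m.drop (i + 1)).drop t)).all
          (fun p => p.1 == p.2) := by
  intro fuel
  induction fuel with
  | zero =>
    intro t hi ht hf
    have htt : t = i + 1 := by omega
    subst htt
    rw [List.drop_eq_nil_of_le (by simp only [List.length_reverse, List.length_take]; omega),
      List.zip_nil_left]
    rfl
  | succ f ih =>
    intro t hi ht hf
    by_cases htt : t = i + 1
    · subst htt
      rw [aWhile_succ, if_neg (by omega)]
      rw [List.drop_eq_nil_of_le (by simp only [List.length_reverse, List.length_take]; omega),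
        List.zip_nil_left]
      rfl
    · have hti : t ≤ i := by omega
      by_cases hk : i + 1 + t < m.length
      · have hjr : ((i : Int) - t) = ((i - t : Nat) : Int) := by omega
        have hkr : ((i : Int) + 1 + t) = ((i + 1 + t : Nat) : Int) := by push_cast; ring
        rw [aWhile_succ, if_pos ⟨by omega, by omega⟩]
        have hget1 : PySem.List.pyGet? m ((i : Int) - t) = some (m[i - t]'(by omega)) := by
          rw [hjr, PySem.List.pyGet?_natCast, List.getElem?_eq_getElem (by omega)]
        have hget2 : PySem.List.pyGet? m ((i : Int) + 1 + t) = some (m[i + 1 + t]'(by omega)) := by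
          rw [hkr, PySem.List.pyGet?_natCast, List.getElem?_eq_getElem (by omega)]
        have hdropA : ((m.take (i + 1)).reverse).drop t =
            m[i - t]'(by omega) :: ((m.take (i + 1)).reverse).drop (t + 1) := by
          rw [List.drop_eq_getElem_cons (by simp [List.length_take]; omega)]
          congr 1
          rw [List.getElem_reverse, List.getElem_take]
          congr 1
          simp only [List.length_take]
          omega
        have hdropB : (m.drop (i + 1)).drop t =
            m[i + 1 + t]'(by omega) :: (m.drop (i + 1)).drop (t + 1) := by
          rw [List.drop_eq_getElem_cons (by simp [List.length_drop]; omega)]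
          congr 1
          rw [List.getElem_drop]
        have hae : are_equals m ((i : Int) - t) ((i : Int) + 1 + t)
            = ((m[i - t]'(by omega)) == (m[i + 1 + t]'(by omega))) := by
          simp only [are_equals, hget1, hget2]
          rfl
        rw [hdropA, hdropB, List.zip_cons_cons, List.all_cons, hae]
        by_cases heq : m[i - t]'(by omega) = m[i + 1 + t]'(by omega)
        · have harith1 : (i : Int) - t - 1 = (i : Int) - (t + 1 : Nat) := by push_cast; ring
          have harith2 : (i : Int) + 1 + t + 1 = (i : Int) + 1 + (t + 1 : Nat) := by
            push_cast; ring
          rw [heq]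
          simp only [beq_self_eq_true, Bool.not_true, Bool.false_eq_true, if_false,
            Bool.true_and]
          rw [harith1, harith2]
          exact ih (t + 1) hi (by omega) (by omega)
        · have hbeq : ((m[i - t]'(by omega)) == (m[i + 1 + t]'(by omega))) = false := by
            simp [heq]
          rw [hbeq]
          rfl
      · rw [aWhile_succ, if_neg (by omega)]
        have : (m.drop (i + 1)).drop t = [] := by
          apply List.drop_eq_nil_of_le
          simp only [List.length_drop]
          omega
        rw [this, List.zip_nil_right]
        rfl

-- the two searches return the same index
theorem outer_eq (m : List (List String)) :
    ∀ (f i : Nat), aOuter m m.length i f = bSearch (m.map (cId m)) m.length i f := by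
  intro f
  induction f with
  | zero => intro i; rfl
  | succ f ih =>
    intro i
    rw [aOuter_succ, bSearch_succ]
    by_cases hcond : i < m.length - 1
    · rw [if_pos (show (i : Int) < (m.length : Int) - 1 by omega), if_pos hcond]
      have hw := while_eq m i m.length 0 (by omega) (by omega) (by omega)
      simp only [Nat.cast_zero, sub_zero, add_zero, List.drop_zero] at hw
      rw [hw, cond_eq]
      split_ifs with h
      · rfl
      · rw [show ((i : Int) + 1) = ((i + 1 : Nat) : Int) by push_cast; ring]
        exact ih (i + 1)
    · rw [if_neg (by omega), if_neg hcond]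

-- ===== VERDICT (by name: the statement is the Claim_ definition above) =====
theorem find_reflection_index_spec : Claim_equal_find_reflection_index := by
  intro matrix _
  show find_reflection_index matrix = find_reflection_index_alt matrix
  simp only [find_reflection_index, find_reflection_index_alt]
  rw [(intern_inv matrix).2.2, List.length_map]
  have h := outer_eq matrix matrix.length 0
  simpa using h
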